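-- pv_equiv track=rewrite | github.com/chehualiu/helloworld01 | 持续监控_v2.0_20240415.py | absAccum
-- ===== SOURCE A (Python) =====
-- def absAccum(l):
--     acc = []
--     for num in l:
--         if len(acc)>0 and acc[-1]<0 and num > 0:
--             acc.append(num)
--         elif len(acc)>0 and acc[-1]>0 and num > 0:
--             acc.append(acc[-1] + num)
--         elif len(acc)>0 and acc[-1]>0 and num < 0:
--             acc.append(num)
--         elif len(acc)>0 and acc[-1]<0 and num < 0:
--             acc.append(acc[-1] + num)
--         else:
--             acc.append(num)
--     return(acc)
-- ===== SOURCE B (Python) =====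
-- def sign(x):
--     return (x > 0) - (x < 0)
--
-- def absAccum(l):
--     out = []
--     i = 0
--     n = len(l)
--     while i < n:
--         s = sign(l[i])
--         j = i + 1
--         while j < n and sign(l[j]) == s:
--             j += 1
--         total = 0
--         for x in l[i:j]:
--             total += x
--             out.append(total)
--         i = j
--     return out
-- ===== Notes on version B (the rewrite author's own statement) =====
-- stated objective: alternative
-- what changed: B replaces A's single branching scan over the last output value with a two-stage pipeline: split the input into maximal runs of equal sign, then emit the running prefix sums of each run.
import Mathlib
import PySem

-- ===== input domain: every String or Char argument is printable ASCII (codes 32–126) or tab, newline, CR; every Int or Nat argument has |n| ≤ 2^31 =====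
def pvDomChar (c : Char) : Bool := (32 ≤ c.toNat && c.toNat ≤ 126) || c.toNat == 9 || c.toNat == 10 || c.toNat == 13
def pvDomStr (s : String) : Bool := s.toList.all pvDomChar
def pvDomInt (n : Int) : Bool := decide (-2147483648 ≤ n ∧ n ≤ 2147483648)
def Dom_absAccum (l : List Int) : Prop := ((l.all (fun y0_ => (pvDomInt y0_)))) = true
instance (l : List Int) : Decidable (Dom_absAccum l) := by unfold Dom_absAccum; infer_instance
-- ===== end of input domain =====

-- B groups the input into maximal runs of equal sign and emits each run's prefix sums;
-- A is a single scan branching on the sign of the previously emitted value.  Same results.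

-- ===== PORT A =====
def absAccumStep (acc : List Int) (num : Int) : List Int :=
  if 0 < acc.length ∧ (PySem.List.pyGet? acc (-1)).getD 0 < 0 ∧ 0 < num then
    acc ++ [num]
  else if 0 < acc.length ∧ 0 < (PySem.List.pyGet? acc (-1)).getD 0 ∧ 0 < num then
    acc ++ [(PySem.List.pyGet? acc (-1)).getD 0 + num]
  else if 0 < acc.length ∧ 0 < (PySem.List.pyGet? acc (-1)).getD 0 ∧ num < 0 then
    acc ++ [num]
  else if 0 < acc.length ∧ (PySem.List.pyGet? acc (-1)).getD 0 < 0 ∧ num < 0 then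
    acc ++ [(PySem.List.pyGet? acc (-1)).getD 0 + num]
  else
    acc ++ [num]

def absAccum (l : List Int) : List Int := l.foldl absAccumStep []

-- ===== PORT B =====
def pySign (x : Int) : Int := (if 0 < x then (1:Int) else 0) - (if x < 0 then 1 else 0)

-- outer while-loop over runs → recursion on the remaining list; inner run scan → foldl
def absAccum_alt (l : List Int) : List Int :=
  match l with
  | [] => []
  | x :: xs =>
    let run := x :: xs.takeWhile (fun y => pySign y == pySign x)
    let rest := xs.dropWhile (fun y => pySign y == pySign x)
    (run.foldl (fun (p : Int × List Int) y => (p.1 + y, p.2 ++ [p.1 + y])) ((0:Int), ([] : List Int))).2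
      ++ absAccum_alt rest
termination_by l.length
decreasing_by
  simpa using Nat.lt_succ_of_le (List.length_dropWhile_le _ _)

-- ===== PRECONDITION & SPEC =====
def Spec_absAccum (l : List Int) (out : List Int) : Prop := out = absAccum_alt l
instance (l : List Int) (out : List Int) : Decidable (Spec_absAccum l out) := by unfold Spec_absAccum; infer_instance

-- ===== CLAIM (what is proved, stated in full; the proofs are below) =====
def Claim_equal_absAccum : Prop := ∀ (l : List Int), Dom_absAccum l → Spec_absAccum l (absAccum l)

-- ===== LEMMAS AND PROOFS =====

-- canonical recursion: next value is prev+x when prev and x share a strict sign, else x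
def gcore (prev : Int) : List Int → List Int
  | [] => []
  | x :: xs =>
    let v := if (0 < prev ∧ 0 < x) ∨ (prev < 0 ∧ x < 0) then prev + x else x
    v :: gcore v xs

-- prefix sums starting from t
def prefixFrom (t : Int) : List Int → List Int
  | [] => []
  | x :: xs => (t + x) :: prefixFrom (t + x) xs

theorem absAccumStep_eq (acc : List Int) (num : Int) :
    absAccumStep acc num =
      acc ++ [if (0 < acc.getLastD 0 ∧ 0 < num) ∨ (acc.getLastD 0 < 0 ∧ num < 0)
              then acc.getLastD 0 + num else num] := by
  rcases acc.eq_nil_or_concat with h | ⟨ys, y, h⟩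
  · subst h
    simp [absAccumStep]
  · subst h
    have hl : (ys ++ [y]).getLastD 0 = y := by simp
    have hg : (PySem.List.pyGet? (ys ++ [y]) (-1)).getD 0 = y := by
      rw [PySem.List.pyGet?_neg_one]; simp
    simp only [absAccumStep]
    have hlen : 0 < ys.length + [y].length := by simp
    split_ifs <;> simp_all <;> omega

theorem foldA (l : List Int) : ∀ acc : List Int,
    l.foldl absAccumStep acc = acc ++ gcore (acc.getLastD 0) l := by
  induction l with
  | nil => intro acc; simp [gcore]
  | cons x xs ih =>
    intro acc
    rw [List.foldl_cons, absAccumStep_eq, ih, gcore]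
    simp

theorem fold_prefix (run : List Int) : ∀ (t : Int) (out : List Int),
    run.foldl (fun (p : Int × List Int) y => (p.1 + y, p.2 ++ [p.1 + y])) (t, out)
      = (t + run.sum, out ++ prefixFrom t run) := by
  induction run with
  | nil => intro t out; simp [prefixFrom]
  | cons x xs ih =>
    intro t out
    rw [List.foldl_cons, ih, prefixFrom]
    simp [add_assoc]

theorem pySign_step {t x : Int} (h : pySign x = pySign t) :
    ((if (0 < t ∧ 0 < x) ∨ (t < 0 ∧ x < 0) then t + x else x) = t + x)
      ∧ pySign (t + x) = pySign t := by
  unfold pySign at *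
  split_ifs at * <;> omega

theorem run_lemma (run : List Int) : ∀ (t : Int) (rest : List Int),
    (∀ y ∈ run, pySign y = pySign t) →
    gcore t (run ++ rest) = prefixFrom t run ++ gcore (t + run.sum) rest := by
  induction run with
  | nil => intro t rest _; simp [prefixFrom]
  | cons x xs ih =>
    intro t rest hall
    have hx : pySign x = pySign t := hall x (by simp)
    obtain ⟨hv, hs⟩ := pySign_step hx
    have hall' : ∀ y ∈ xs, pySign y = pySign (t + x) := by
      intro y hy; rw [hs]; exact hall y (by simp [hy])
    rw [List.cons_append, gcore]
    simp only [hv, prefixFrom]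
    rw [ih (t + x) rest hall']
    simp
    ring_nf

theorem pySign_sum (run : List Int) : ∀ t : Int,
    (∀ y ∈ run, pySign y = pySign t) → pySign (t + run.sum) = pySign t := by
  induction run with
  | nil => intro t _; simp
  | cons x xs ih =>
    intro t hall
    obtain ⟨hv, hs⟩ := pySign_step (hall x (by simp))
    have := ih (t + x) (fun y hy => by rw [hs]; exact hall y (by simp [hy]))
    simpa [add_assoc, hs] using this

theorem dropWhile_head_false {α : Type} (p : α → Bool) (l : List α) :
    ∀ z, (l.dropWhile p).head? = some z → p z = false := by
  induction l with
  | nil => intro z h; simp [List.dropWhile] at h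
  | cons x xs ih =>
    intro z h
    by_cases hp : p x = true
    · rw [List.dropWhile_cons_of_pos hp] at h; exact ih z h
    · rw [List.dropWhile_cons_of_neg hp] at h
      simp at h
      subst h
      simpa using hp

theorem gcore_runs : ∀ (n : ℕ) (l : List Int) (t : Int), l.length ≤ n →
    (∀ x, l.head? = some x → pySign x ≠ pySign t ∨ t = 0) →
    gcore t l = absAccum_alt l := by
  intro n
  induction n with
  | zero =>
    intro l t hlen _
    have : l = [] := List.eq_nil_of_length_eq_zero (Nat.le_zero.mp hlen)
    subst this; simp [gcore, absAccum_alt]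
  | succ n ih =>
    intro l t hlen hb
    match l with
    | [] => simp [gcore, absAccum_alt]
    | x :: xs =>
      have hbx := hb x rfl
      have hv : (if (0 < t ∧ 0 < x) ∨ (t < 0 ∧ x < 0) then t + x else x) = x := by
        rcases hbx with h | h
        · unfold pySign at h; split_ifs at * <;> omega
        · subst h; split_ifs with hc
          · omega
          · rfl
      set p : Int → Bool := fun y => pySign y == pySign x with hp
      set run' := xs.takeWhile p with hrun
      set rest := xs.dropWhile p with hrest
      have hxs : xs = run' ++ rest := (List.takeWhile_append_dropWhile (p := p) (l := xs)).symm
      have hall : ∀ y ∈ run', pySign y = pySign x := by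
        intro y hy
        have := List.mem_takeWhile_imp hy
        simpa [hp] using this
      have hsum : pySign (x + run'.sum) = pySign x := pySign_sum run' x hall
      have hrestb : ∀ z, rest.head? = some z → pySign z ≠ pySign (x + run'.sum) ∨ (x + run'.sum) = 0 := by
        intro z hz
        left
        have := dropWhile_head_false p xs z hz
        rw [hsum]
        simpa [hp] using this
      have hrl : rest.length ≤ n := by
        have h1 : rest.length ≤ xs.length := List.length_dropWhile_le _ _
        simp at hlen
        omega
      calc gcore t (x :: xs)
          = x :: gcore x xs := by rw [gcore]; simp only [hv]
        _ = x :: (prefixFrom x run' ++ gcore (x + run'.sum) rest) := by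
              rw [hxs, run_lemma run' x rest hall]
        _ = x :: (prefixFrom x run' ++ absAccum_alt rest) := by
              rw [ih rest (x + run'.sum) hrl hrestb]
        _ = absAccum_alt (x :: xs) := by
              rw [absAccum_alt]
              simp only [← hp, ← hrun, ← hrest, fold_prefix, prefixFrom]
              simp

-- ===== VERDICT (by name: the statement is the Claim_ definition above) =====
theorem absAccum_spec : Claim_equal_absAccum := by
  intro l _
  unfold Spec_absAccum absAccum
  rw [foldA l []]
  simp only [List.nil_append, List.getLastD]
  exact gcore_runs l.length l 0 le_rfl (fun x _ => Or.inr rfl)
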